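-- pv_equiv track=rewrite | github.com/minkookBae/algorithm_prac | 쇠막대기.py | solution
-- ===== SOURCE A (Python) =====
-- def solution(arrangement):
--     answer = 0
--     stack = []
--
--     for i in range(len(arrangement)):
--         if(arrangement[i] == '('):
--             stack.append('(')
--
--         else:
--             temp = stack.pop()
--             if(arrangement[i-1] == '('):
--                 answer += len(stack)
--             else:
--                 answer += 1
--
--
--     return answer
-- ===== SOURCE B (Python) =====
-- def solution(arrangement):
--     # prefix-balance table: bal[j] = #'(' - #closers in arrangement[:j]
--     bal = [0]
--     b = 0
--     for c in arrangement:
--         b += 1 if c == '(' else -1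
--         bal.append(b)
--     if min(bal) < 0:
--         raise ValueError("unmatched closing character")
--     # each closer at j>0 contributes: bal[j-1] if it ends a laser (prev char '('), else 1
--     return sum(d if p == '(' else 1
--                for p, c, d in zip(arrangement, arrangement[1:], bal)
--                if c != '(')
-- ===== Notes on version B (the rewrite author's own statement) =====
-- stated objective: alternative
-- what changed: B replaces A's stack and index loop by two staged passes: it first builds a prefix-balance table (rejecting input with an unmatched closer, where A's empty-stack pop raises), then sums over zipped adjacent character pairs the contribution of each closer -- the stored balance for a laser pair, 1 for a bar end -- so no stack is maintained.
import Mathlib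
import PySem

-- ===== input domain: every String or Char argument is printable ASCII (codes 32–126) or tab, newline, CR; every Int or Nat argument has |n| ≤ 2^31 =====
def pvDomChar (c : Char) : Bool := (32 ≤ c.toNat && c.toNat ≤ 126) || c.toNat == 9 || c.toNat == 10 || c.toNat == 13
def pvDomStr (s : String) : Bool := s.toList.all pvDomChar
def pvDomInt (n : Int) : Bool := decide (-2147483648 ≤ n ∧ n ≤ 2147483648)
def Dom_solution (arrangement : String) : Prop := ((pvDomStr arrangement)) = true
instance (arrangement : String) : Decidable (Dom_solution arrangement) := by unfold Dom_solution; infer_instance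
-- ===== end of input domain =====

-- B drops A's stack: it builds a prefix-balance table, then sums the closers' contributions
-- over zipped adjacent pairs (objective: alternative two-pass algorithm); same cost, return value only.

-- ===== PORT A =====
-- A's loop, carrying (answer, stack); prev is always arrangement[i-1] (for i = 0 that is
-- arrangement[-1], Python's wrap-around, supplied as pyGet? (-1) at the call).
-- Python pushes/pops at the list's end; here the stack top is the list head (same length, same pops).
def solGo (answer : Int) (stack : List Char) (prev : Option Char) : List Char → Int
  | [] => answer
  | c :: rest =>
    if c = '(' then
      solGo answer ('(' :: stack) (some c) rest
    else
      match stack with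
      | [] => answer            -- Python raises IndexError here; excluded by Pre_solution
      | _ :: st =>
        if prev = some '(' then solGo (answer + (st.length : Int)) st (some c) rest
        else solGo (answer + 1) st (some c) rest

def solution (arrangement : String) : Int :=
  solGo 0 [] (PySem.List.pyGet? arrangement.toList (-1)) arrangement.toList

-- ===== PORT B =====
-- first pass of Source B: the running balances appended after the initial 0 (Source B's append loop,
-- as the structural recursion emitting the same values in the same order)
def balGo (b : Int) : List Char → List Int
  | [] => []
  | c :: rest => (b + if c = '(' then 1 else -1) :: balGo (b + if c = '(' then 1 else -1) rest

def solution_alt (arrangement : String) : Int :=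
  let l := arrangement.toList
  let bal : List Int := 0 :: balGo 0 l            -- bal = [0]; for c: bal.append(b)
  if bal.foldl min 0 < 0 then 0                   -- Python: raise ValueError (bal starts with 0,
                                                  -- so foldl min 0 bal = min(bal)); outside Pre_
  else
    -- sum(d if p == '(' else 1 for p, c, d in zip(arrangement, arrangement[1:], bal) if c != '(')
    ((l.zip (l.drop 1)).zip bal).foldl
      (fun total x => if x.1.2 ≠ '(' then total + (if x.1.1 = '(' then x.2 else 1) else total) 0

-- ===== PRECONDITION & SPEC =====
-- Pre_ excludes exactly the inputs on which A raises IndexError (stack.pop() on an empty stack):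
-- some prefix containing more non-'(' characters than '(' characters.
def Pre_solution (arrangement : String) : Prop :=
  ∀ p ∈ arrangement.toList.inits, p.countP (fun c => c ≠ '(') ≤ p.count '('
instance (arrangement : String) : Decidable (Pre_solution arrangement) := by
  unfold Pre_solution; infer_instance

def pvWitness_solution : String := "((()(()()))(())"

def Spec_solution (arrangement : String) (out : Int) : Prop := out = solution_alt arrangement
instance (arrangement : String) (out : Int) : Decidable (Spec_solution arrangement out) := by
  unfold Spec_solution; infer_instance

-- ===== CLAIM (what is proved, stated in full; the proofs are below) =====
def Claim_equal_solution : Prop := ∀ (arrangement : String), Dom_solution arrangement → Pre_solution arrangement → Spec_solution arrangement (solution arrangement)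

-- ===== LEMMAS AND PROOFS =====

-- stack discipline of A: enough opens before every pop
def bal (d : Nat) : List Char → Prop
  | [] => True
  | c :: rest => if c = '(' then bal (d + 1) rest else 0 < d ∧ bal (d - 1) rest

lemma bal_of_counts (l : List Char) : ∀ d : Nat,
    (∀ q, q <+: l → q.countP (fun c => c ≠ '(') ≤ d + q.count '(') → bal d l := by
  induction l with
  | nil => intro d _; trivial
  | cons c rest ih =>
    intro d hq
    by_cases hc : c = '('
    · subst hc
      simp only [bal]
      apply ih
      intro q hq'
      have := hq ('(' :: q) (by simpa using hq')
      simp at this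
      simp only [decide_not]
      omega
    · simp only [bal, if_neg hc]
      constructor
      · have := hq [c] ⟨rest, rfl⟩
        simp [hc] at this
        omega
      · apply ih
        intro q hq'
        have := hq (c :: q) (by simpa using hq')
        simp [hc] at this ⊢
        omega

-- the mathematical middle form both ports reach: closers' contributions, carrying the
-- previous character and the balance d before the current character
def bsum : Option Char → Int → List Char → Int
  | _, _, [] => 0
  | prev, d, c :: rest =>
    if c = '(' then bsum (some c) (d + 1) rest
    else (if prev = some '(' then d - 1 else if prev = none then 0 else 1)
         + bsum (some c) (d - 1) rest

-- A's initial prev is consulted only at a leading closer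
lemma solGo_prev_irrel (a : Int) (st : List Char) (p q : Option Char) (l : List Char)
    (h : l = [] ∨ l.head? = some '(') : solGo a st p l = solGo a st q l := by
  rcases h with h | h
  · subst h; rfl
  · match l with
    | c :: rest =>
      simp at h; subst h
      simp [solGo]

-- A's loop equals bsum, with d synced to the stack length
lemma solGo_eq_bsum : ∀ (l : List Char) (a : Int) (st : List Char) (prev : Option Char),
    bal st.length l → (prev = none → l = [] ∨ l.head? = some '(') →
    solGo a st prev l = a + bsum prev (st.length : Int) l := by
  intro l
  induction l with
  | nil => intro a st prev _ _; simp [solGo, bsum]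
  | cons c rest ih =>
    intro a st prev hbal hn
    by_cases hc : c = '('
    · subst hc
      simp [bal] at hbal
      rw [show solGo a st prev ('(' :: rest) = solGo a ('(' :: st) (some '(') rest from by
        simp [solGo]]
      rw [ih a ('(' :: st) (some '(') (by simpa using hbal) (by simp)]
      have hx : ((('(' :: st).length : Nat) : Int) = (st.length : Int) + 1 := by
        push_cast [List.length_cons]; omega
      rw [hx]
      simp [bsum]
    · simp [bal, hc] at hbal
      obtain ⟨hd, hbal'⟩ := hbal
      match st with
      | s0 :: st' =>
        have hx : (((s0 :: st').length : Nat) : Int) - 1 = (st'.length : Int) := by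
          push_cast [List.length_cons]; omega
        by_cases hp : prev = some '('
        · rw [show solGo a (s0 :: st') prev (c :: rest)
              = solGo (a + (st'.length : Int)) st' (some c) rest from by
            simp [solGo, hc, hp]]
          rw [ih _ st' (some c) (by simpa using hbal') (by simp)]
          simp only [bsum, if_neg hc, hp]
          rw [hx, if_pos trivial]
          ring
        · have hnn : prev ≠ none := by
            intro h
            rcases hn h with h' | h'
            · simp at h'
            · simp at h'; exact hc h'
          rw [show solGo a (s0 :: st') prev (c :: rest)
              = solGo (a + 1) st' (some c) rest from by
            simp [solGo, hc, hp]]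
          rw [ih _ st' (some c) (by simpa using hbal') (by simp)]
          simp only [bsum, if_neg hc, if_neg hp, if_neg hnn]
          rw [hx]
          ring

-- B's zipped fold equals bsum
lemma zipfold_eq_bsum : ∀ (l : List Char) (p : Char) (d acc : Int),
    (((p :: l).zip l).zip (d :: balGo d (p :: l))).foldl
      (fun total x => if x.1.2 ≠ '(' then total + (if x.1.1 = '(' then x.2 else 1) else total) acc
    = acc + bsum (some p) (d + if p = '(' then 1 else -1) l := by
  intro l
  induction l with
  | nil => intro p d acc; simp [bsum]
  | cons c rest ih =>
    intro p d acc
    have hzip : ((p :: c :: rest).zip (c :: rest)) = (p, c) :: ((c :: rest).zip rest) := rfl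
    have hbal : balGo d (p :: c :: rest)
        = (d + if p = '(' then 1 else -1) :: balGo (d + if p = '(' then 1 else -1) (c :: rest) := rfl
    rw [hzip, hbal]
    show ((((p, c) :: ((c :: rest).zip rest)).zip
        (d :: (d + if p = '(' then 1 else -1) :: balGo (d + if p = '(' then 1 else -1) (c :: rest))).foldl _ acc) = _
    rw [show (((p, c) :: ((c :: rest).zip rest)).zip
        (d :: (d + if p = '(' then 1 else -1) :: balGo (d + if p = '(' then 1 else -1) (c :: rest)))
      = ((p, c), d) :: (((c :: rest).zip rest).zip
          ((d + if p = '(' then 1 else -1) :: balGo (d + if p = '(' then 1 else -1) (c :: rest))) from rfl]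
    rw [List.foldl_cons, ih c (d + if p = '(' then 1 else -1)]
    by_cases hc : c = '('
    · simp only [bsum, hc]
      simp
    · by_cases hp : p = '('
      · simp only [bsum, if_neg hc, hp]
        simp [hc]
        ring_nf
      · simp only [bsum, if_neg hc, if_neg hp]
        simp [hc, hp]
        ring_nf

lemma alt_eq_bsum (l : List Char) :
    (((l.zip (l.drop 1)).zip (0 :: balGo 0 l)).foldl
      (fun total x => if x.1.2 ≠ '(' then total + (if x.1.1 = '(' then x.2 else 1) else total) 0)
    = bsum none 0 l := by
  match l with
  | [] => simp [bsum]
  | p :: rest =>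
    have : (p :: rest).drop 1 = rest := rfl
    rw [this, zipfold_eq_bsum rest p 0 0]
    by_cases hp : p = '('
    · simp [bsum, hp]
    · simp [bsum, hp]

-- under A's stack discipline every running balance is nonnegative
lemma balGo_nonneg : ∀ (l : List Char) (d : Nat), bal d l → ∀ x ∈ balGo (d : Int) l, 0 ≤ x := by
  intro l
  induction l with
  | nil => intro d _ x hx; simp [balGo] at hx
  | cons c rest ih =>
    intro d hbal x hx
    by_cases hc : c = '('
    · subst hc
      simp [bal] at hbal
      simp [balGo] at hx
      rcases hx with hx | hx
      · omega
      · have := ih (d + 1) (by simpa using hbal) x (by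
          have : ((d : Int) + 1) = ((d + 1 : Nat) : Int) := by push_cast; ring
          rw [this] at hx; exact hx)
        exact this
    · simp [bal, hc] at hbal
      obtain ⟨hd, hbal'⟩ := hbal
      simp [balGo, hc] at hx
      rcases hx with hx | hx
      · omega
      · have hcast : ((d : Int) + -1) = ((d - 1 : Nat) : Int) := by push_cast [Nat.cast_sub hd]; ring
        exact ih (d - 1) hbal' x (by rw [hcast] at hx; exact hx)

lemma foldl_min_nonneg : ∀ (l : List Int) (a : Int), 0 ≤ a → (∀ x ∈ l, 0 ≤ x) → 0 ≤ l.foldl min a := by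
  intro l
  induction l with
  | nil => intro a ha _; simpa using ha
  | cons x rest ih =>
    intro a ha h
    simp only [List.foldl_cons]
    exact ih (min a x) (le_min ha (h x (by simp))) (fun y hy => h y (by simp [hy]))

-- ===== VERDICT (by name: the statement is the Claim_ definition above) =====
theorem solution_spec : Claim_equal_solution := by
  intro arrangement _ hpre
  unfold Spec_solution solution solution_alt
  have hbal : bal 0 arrangement.toList := by
    apply bal_of_counts
    intro q hq'
    have := hpre q ((List.mem_inits q arrangement.toList).mpr hq')
    simpa using this
  have hH : arrangement.toList = [] ∨ arrangement.toList.head? = some '(' := by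
    match hl : arrangement.toList with
    | [] => left; rfl
    | c :: t =>
      by_cases hc : c = '('
      · right; simp [hc]
      · exfalso
        have := hpre [c] ((List.mem_inits [c] arrangement.toList).mpr (by rw [hl]; exact ⟨t, rfl⟩))
        simp [hc] at this
  have hguard : ¬ ((0 :: balGo 0 arrangement.toList).foldl min 0 < 0) := by
    have h0 : ∀ x ∈ balGo ((0 : Nat) : Int) arrangement.toList, 0 ≤ x :=
      balGo_nonneg arrangement.toList 0 hbal
    have : 0 ≤ ((0 : Int) :: balGo 0 arrangement.toList).foldl min 0 := by
      apply foldl_min_nonneg _ _ le_rfl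
      intro x hx
      simp at hx
      rcases hx with hx | hx
      · omega
      · exact h0 x (by simpa using hx)
    omega
  rw [if_neg hguard]
  rw [solGo_prev_irrel 0 [] _ none _ hH]
  rw [solGo_eq_bsum arrangement.toList 0 [] none (by simpa using hbal) (fun _ => hH)]
  rw [alt_eq_bsum]
  simp
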